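-- pv_equiv track=rewrite | github.com/vaishnavipawar09/Applied-Algorithms | Assignment 7/AA_Assignment7_VP.py | WeightLimitedPathsExist
-- ===== SOURCE A (Python) =====
-- def WeightLimitedPathsExist(n, edgelist, querylist):
--     bridgeConnections = {ctr: [] for ctr in range(n)}
--     for edgeA, edgeB, edgewt in edgelist:
--         bridgeConnections[edgeA].append((edgeB, edgewt))
--         bridgeConnections[edgeB].append((edgeA, edgewt))
--
--     def usingdfs(currentIsland, targetIsland, maxweight, visitedIslands):
--         if currentIsland == targetIsland:
--             return True
--         visitedIslands.add(currentIsland)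
--         for nxtIsland, bridgeCapacity in bridgeConnections[currentIsland]:
--             if nxtIsland not in visitedIslands and maxweight <= bridgeCapacity:
--                 if usingdfs(nxtIsland, targetIsland, maxweight, visitedIslands):
--                     return True
--         return False
--
--     journeypossible = []
--     for startpt, endpt, weightcapacity in querylist:
--         visitedIslands = set()
--         resultobtained = usingdfs(
--             startpt, endpt, weightcapacity, visitedIslands)
--         journeypossible.append(resultobtained)
--
--     return journeypossible
-- ===== SOURCE B (Python) =====
-- def WeightLimitedPathsExist(n, edgelist, querylist):
--     # Iterative breadth-first search per query: explicit FIFO queue (index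
--     # pointer), nodes marked when enqueued, instead of A's recursive DFS with
--     # a shared mutated visited set and early returns up the call stack.
--     adj = {v: [] for v in range(n)}
--     for a, b, c in edgelist:
--         adj[a].append((b, c))
--         adj[b].append((a, c))
--
--     out = []
--     for s, t, w in querylist:
--         queue = [s]
--         seen = {s}
--         i = 0
--         found = False
--         while i < len(queue):
--             u = queue[i]
--             i += 1
--             if u == t:
--                 found = True
--                 break
--             for v, c in adj[u]:
--                 if c >= w and v not in seen:
--                     seen.add(v)
--                     queue.append(v)
--         out.append(found)
--     return out
-- ===== Notes on version B (the rewrite author's own statement) =====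
-- stated objective: alternative
-- what changed: B replaces A's per-query recursive DFS (shared mutated visited set, early returns up the call stack) by an iterative FIFO breadth-first search: an explicit queue with an index pointer, nodes marked when enqueued, and a found flag.
import Mathlib
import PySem

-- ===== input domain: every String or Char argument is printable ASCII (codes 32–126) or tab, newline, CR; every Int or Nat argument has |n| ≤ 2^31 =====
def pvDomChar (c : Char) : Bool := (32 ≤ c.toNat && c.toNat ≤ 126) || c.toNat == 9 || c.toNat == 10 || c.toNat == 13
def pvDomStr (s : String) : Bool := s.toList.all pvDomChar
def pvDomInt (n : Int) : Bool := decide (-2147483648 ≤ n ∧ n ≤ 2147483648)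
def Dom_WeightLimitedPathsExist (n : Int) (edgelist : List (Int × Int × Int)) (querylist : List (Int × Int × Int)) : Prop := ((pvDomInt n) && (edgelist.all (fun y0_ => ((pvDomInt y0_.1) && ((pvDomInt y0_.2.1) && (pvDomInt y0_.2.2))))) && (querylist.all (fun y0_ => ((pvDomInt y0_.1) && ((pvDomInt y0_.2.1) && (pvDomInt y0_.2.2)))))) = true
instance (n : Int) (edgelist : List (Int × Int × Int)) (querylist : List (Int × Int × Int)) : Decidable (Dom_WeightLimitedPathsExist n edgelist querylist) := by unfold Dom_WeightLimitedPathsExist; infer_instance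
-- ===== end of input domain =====

-- B replaces A's per-query recursive DFS (shared mutated visited set, early returns)
-- by an iterative FIFO breadth-first search with an explicit queue and mark-on-enqueue
-- (objective: alternative decomposition, not faster).

-- ===== PORT A =====
-- bridgeConnections = {ctr: [] for ctr in range(n)}; then append both directions per edge.
-- (Python raises KeyError when an edge endpoint is not a key; `modify` silently inserts
-- there — exact on Pre_, which guarantees every indexed key is present.)
def pvAdjA (n : Int) (edgelist : List (Int × Int × Int)) : PySem.Dict Int (List (Int × Int)) :=
  let d0 : PySem.Dict Int (List (Int × Int)) :=
    (PySem.List.pyRange 0 n 1).foldl (fun d c => d.insert c []) PySem.Dict.empty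
  edgelist.foldl (fun d e =>
    (d.modify e.1 [] (fun l => l ++ [(e.2.1, e.2.2)])).modify e.2.1 [] (fun l => l ++ [(e.1, e.2.2)])) d0

-- usingdfs, with its mutated visited set threaded through, plus a fuel guard that makes the
-- recursion well-founded (each consuming call adds a fresh node, so n.toNat + 1 never runs out
-- inside Pre_).
mutual
def pvDfsA (adj : PySem.Dict Int (List (Int × Int))) (t w : Int) (fuel : Nat) (c : Int)
    (V : PySem.Set Int) : Bool × PySem.Set Int :=
  if c = t then (true, V)
  else match fuel with
    | 0 => (false, V)
    | fuel' + 1 => pvVisitA adj t w fuel' (adj.getD c []) (PySem.Set.add V c)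
termination_by (fuel, 0)

def pvVisitA (adj : PySem.Dict Int (List (Int × Int))) (t w : Int) (fuel : Nat)
    (l : List (Int × Int)) (V : PySem.Set Int) : Bool × PySem.Set Int :=
  match l with
  | [] => (false, V)
  | (nxt, cap) :: rest =>
    if PySem.Set.contains V nxt = false ∧ w ≤ cap then
      match pvDfsA adj t w fuel nxt V with
      | (true, V') => (true, V')
      | (false, V') => pvVisitA adj t w fuel rest V'
    else pvVisitA adj t w fuel rest V
termination_by (fuel, l.length + 1)
end

def WeightLimitedPathsExist (n : Int) (edgelist : List (Int × Int × Int)) (querylist : List (Int × Int × Int)) : List Bool :=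
  let adj := pvAdjA n edgelist
  querylist.foldl (fun acc q =>
    acc ++ [(pvDfsA adj q.2.1 q.2.2 (n.toNat + 1) q.1 PySem.Set.empty).1]) []

-- ===== PORT B =====
-- adj = {v: [] for v in range(n)} plus append both directions per edge (same build as A)
def pvAdjB (n : Int) (edgelist : List (Int × Int × Int)) : PySem.Dict Int (List (Int × Int)) :=
  let d0 : PySem.Dict Int (List (Int × Int)) :=
    (PySem.List.pyRange 0 n 1).foldl (fun d c => d.insert c []) PySem.Dict.empty
  edgelist.foldl (fun d e =>
    (d.modify e.1 [] (fun l => l ++ [(e.2.1, e.2.2)])).modify e.2.1 [] (fun l => l ++ [(e.1, e.2.2)])) d0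

-- one pass of `for v, c in adj[u]: ...` over the state (queue-suffix, seen)
def pvStepB (w : Int) (nbrs : List (Int × Int)) (st : List Int × PySem.Set Int) :
    List Int × PySem.Set Int :=
  nbrs.foldl (fun st p =>
    if w ≤ p.2 ∧ PySem.Set.contains st.2 p.1 = false then
      (st.1 ++ [p.1], PySem.Set.add st.2 p.1)
    else st) st

-- `while i < len(queue): ...` — the unprocessed suffix queue[i:] is the list argument,
-- appends go to its back; fuel-guarded (every enqueue marks a fresh node, so
-- n.toNat + 2 iterations always suffice inside Pre_).
def pvBfsB (adj : PySem.Dict Int (List (Int × Int))) (t w : Int) :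
    Nat → List Int → PySem.Set Int → Bool
  | 0, _, _ => false
  | _ + 1, [], _ => false
  | fuel' + 1, u :: rest, seen =>
    if u = t then true
    else
      let st := pvStepB w (adj.getD u []) (rest, seen)
      pvBfsB adj t w fuel' st.1 st.2

def WeightLimitedPathsExist_alt (n : Int) (edgelist : List (Int × Int × Int)) (querylist : List (Int × Int × Int)) : List Bool :=
  let adj := pvAdjB n edgelist
  querylist.foldl (fun acc q =>
    acc ++ [pvBfsB adj q.2.1 q.2.2 (n.toNat + 2) [q.1] (PySem.Set.add PySem.Set.empty q.1)]) []

-- ===== PRECONDITION & SPEC =====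
-- Pre_ excludes exactly the inputs where A raises KeyError: an edge endpoint outside
-- range(n), or a query whose start differs from its target and lies outside range(n).
def Pre_WeightLimitedPathsExist (n : Int) (edgelist : List (Int × Int × Int)) (querylist : List (Int × Int × Int)) : Prop :=
  (∀ e ∈ edgelist, 0 ≤ e.1 ∧ e.1 < n ∧ 0 ≤ e.2.1 ∧ e.2.1 < n) ∧
  (∀ q ∈ querylist, q.1 = q.2.1 ∨ (0 ≤ q.1 ∧ q.1 < n))
instance (n : Int) (edgelist : List (Int × Int × Int)) (querylist : List (Int × Int × Int)) : Decidable (Pre_WeightLimitedPathsExist n edgelist querylist) := by unfold Pre_WeightLimitedPathsExist; infer_instance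

def pvWitness_WeightLimitedPathsExist : Int × (List (Int × Int × Int)) × (List (Int × Int × Int)) :=
  (3, [(0, 1, 5), (1, 2, 2)], [(0, 2, 3), (0, 2, 1), (2, 2, 9)])

def Spec_WeightLimitedPathsExist (n : Int) (edgelist : List (Int × Int × Int)) (querylist : List (Int × Int × Int)) (out : List Bool) : Prop := out = WeightLimitedPathsExist_alt n edgelist querylist
instance (n : Int) (edgelist : List (Int × Int × Int)) (querylist : List (Int × Int × Int)) (out : List Bool) : Decidable (Spec_WeightLimitedPathsExist n edgelist querylist out) := by unfold Spec_WeightLimitedPathsExist; infer_instance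

-- ===== CLAIM (what is proved, stated in full; the proofs are below) =====
def Claim_equal_WeightLimitedPathsExist : Prop := ∀ (n : Int) (edgelist : List (Int × Int × Int)) (querylist : List (Int × Int × Int)), Dom_WeightLimitedPathsExist n edgelist querylist → Pre_WeightLimitedPathsExist n edgelist querylist → Spec_WeightLimitedPathsExist n edgelist querylist (WeightLimitedPathsExist n edgelist querylist)
-- ===== LEMMAS AND PROOFS =====

-- the common interface: one weight-feasible undirected edge step, and reachability
def pvAdjRel (E : List (Int × Int × Int)) (w x y : Int) : Prop :=
  ∃ e ∈ E, w ≤ e.2.2 ∧ ((x = e.1 ∧ y = e.2.1) ∨ (x = e.2.1 ∧ y = e.1))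

def pvConn (E : List (Int × Int × Int)) (w s t : Int) : Prop :=
  Relation.ReflTransGen (pvAdjRel E w) s t

theorem pv_not_mem {s : PySem.Set Int} {x : Int} (h : PySem.Set.contains s x = false) : x ∉ s :=
  fun hm => by simp at h; exact h hm

theorem pv_mem {s : PySem.Set Int} {x : Int} (h : PySem.Set.contains s x = true) : x ∈ s :=
  (PySem.Set.contains_iff s x).1 h

theorem pvStepB_spec (w : Int) (l : List (Int × Int)) :
    ∀ st : List Int × PySem.Set Int, ∃ new : List Int,
      pvStepB w l st = (st.1 ++ new, st.2 ++ new) ∧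
      (∀ x ∈ new, (∃ p ∈ l, x = p.1 ∧ w ≤ p.2) ∧ x ∉ st.2) ∧
      (∀ p ∈ l, w ≤ p.2 → p.1 ∈ st.2 ++ new) ∧
      (st.2.Nodup → (st.2 ++ new).Nodup) := by
  induction l with
  | nil =>
    intro st
    exact ⟨[], by simp [pvStepB], by simp, by simp, by simp⟩
  | cons p l ih =>
    intro st
    have hcons : pvStepB w (p :: l) st = pvStepB w l
        (if w ≤ p.2 ∧ PySem.Set.contains st.2 p.1 = false then
          (st.1 ++ [p.1], PySem.Set.add st.2 p.1) else st) := by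
      simp [pvStepB, List.foldl_cons]
    by_cases hc : w ≤ p.2 ∧ PySem.Set.contains st.2 p.1 = false
    · have hadd : PySem.Set.add st.2 p.1 = st.2 ++ [p.1] :=
        PySem.Set.add_of_not_mem (pv_not_mem hc.2)
      rw [if_pos hc, hadd] at hcons
      obtain ⟨new, h1, h2, h3, h4⟩ := ih (st.1 ++ [p.1], st.2 ++ [p.1])
      refine ⟨p.1 :: new, ?_, ?_, ?_, ?_⟩
      · rw [hcons, h1]; simp
      · intro x hx
        rcases List.mem_cons.1 hx with h | h
        · exact ⟨⟨p, List.mem_cons_self, h, hc.1⟩, h ▸ pv_not_mem hc.2⟩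
        · obtain ⟨⟨p', hp', hxe, hwp'⟩, hxn⟩ := h2 x h
          exact ⟨⟨p', List.mem_cons_of_mem _ hp', hxe, hwp'⟩,
            fun hmem => hxn (List.mem_append.2 (Or.inl hmem))⟩
      · intro q hq hwq
        rcases List.mem_cons.1 hq with h | h
        · subst h; simp
        · have := h3 q h hwq
          simpa [List.append_assoc] using this
      · intro hnd
        have : (st.2 ++ [p.1]).Nodup := hadd ▸ PySem.Set.nodup_add _ _ hnd
        simpa [List.append_assoc] using h4 this
    · rw [if_neg hc] at hcons
      obtain ⟨new, h1, h2, h3, h4⟩ := ih st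
      refine ⟨new, hcons ▸ h1, ?_, ?_, h4⟩
      · intro x hx
        obtain ⟨⟨p', hp', hxe, hwp'⟩, hxn⟩ := h2 x hx
        exact ⟨⟨p', List.mem_cons_of_mem _ hp', hxe, hwp'⟩, hxn⟩
      intro q hq hwq
      rcases List.mem_cons.1 hq with h | h
      · subst h
        have : PySem.Set.contains st.2 q.1 = true := by
          cases hcc : PySem.Set.contains st.2 q.1
          · exact absurd ⟨hwq, hcc⟩ hc
          · rfl
        exact List.mem_append.2 (Or.inl (pv_mem this))
      · exact h3 q h hwq

theorem pvBfsB_sound (E : List (Int × Int × Int)) (adj : PySem.Dict Int (List (Int × Int)))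
    (s t w : Int)
    (Hadj : ∀ c y cap, (y, cap) ∈ adj.getD c [] → w ≤ cap → pvAdjRel E w c y) :
    ∀ fuel : Nat, ∀ (queue : List Int) (seen : PySem.Set Int),
      (∀ x ∈ seen, pvConn E w s x) → (∀ x ∈ queue, x ∈ seen) →
      pvBfsB adj t w fuel queue seen = true → pvConn E w s t := by
  intro fuel
  induction fuel with
  | zero => intro queue seen _ _ h; simp [pvBfsB] at h
  | succ fuel ih =>
    intro queue seen hseen hq h
    cases queue with
    | nil => simp [pvBfsB] at h
    | cons u rest =>
      simp only [pvBfsB] at h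
      by_cases hut : u = t
      · exact hut ▸ hseen u (hq u List.mem_cons_self)
      · rw [if_neg hut] at h
        obtain ⟨new, h1, h2, _, _⟩ := pvStepB_spec w (adj.getD u []) (rest, seen)
        simp only [h1] at h
        refine ih (rest ++ new) (seen ++ new) ?_ ?_ h
        · intro x hx
          rcases List.mem_append.1 hx with hx | hx
          · exact hseen x hx
          · obtain ⟨⟨p, hp, hxe, hwp⟩, _⟩ := h2 x hx
            exact (hseen u (hq u List.mem_cons_self)).tail
              (hxe ▸ Hadj u p.1 p.2 hp hwp)
        · intro x hx
          rcases List.mem_append.1 hx with hx | hx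
          · exact List.mem_append.2 (Or.inl (hq x (List.mem_cons_of_mem _ hx)))
          · exact List.mem_append.2 (Or.inr hx)

theorem pvBfsB_complete (E : List (Int × Int × Int)) (adj : PySem.Dict Int (List (Int × Int)))
    (t w : Int) (U : List Int)
    (Hadj1 : ∀ c y cap, (y, cap) ∈ adj.getD c [] → y ∈ U)
    (Hadj2 : ∀ c y, pvAdjRel E w c y → ∃ cap, (y, cap) ∈ adj.getD c [] ∧ w ≤ cap) :
    ∀ fuel : Nat, ∀ (queue : List Int) (seen : PySem.Set Int),
      (∀ x ∈ queue, x ∈ seen) → queue.Nodup → seen.Nodup → (∀ x ∈ seen, x ∈ U) →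
      (∀ x ∈ seen, x ∉ queue → x ≠ t ∧ ∀ y, pvAdjRel E w x y → y ∈ seen) →
      U.length + queue.length + 1 ≤ fuel + seen.length →
      pvBfsB adj t w fuel queue seen = false →
      ∀ x ∈ seen, ∀ z, Relation.ReflTransGen (pvAdjRel E w) x z → z ≠ t := by
  intro fuel
  induction fuel with
  | zero =>
    intro queue seen _ _ hnd hsU _ hfuel _
    have := (List.subperm_of_subset hnd hsU).length_le
    omega
  | succ fuel ih =>
    intro queue seen hq hqnd hnd hsU hclosed hfuel hres
    cases queue with
    | nil =>
      intro x hx z hz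
      have hgrow : ∀ a b, Relation.ReflTransGen (pvAdjRel E w) a b → a ∈ seen → b ∈ seen := by
        intro a b hab
        induction hab with
        | refl => exact fun h => h
        | tail hab hbc ihab =>
          intro ha
          exact (hclosed _ (ihab ha) (by simp)).2 _ hbc
      exact (hclosed z (hgrow x z hz hx) (by simp)).1
    | cons u rest =>
      simp only [pvBfsB] at hres
      by_cases hut : u = t
      · rw [if_pos hut] at hres; exact absurd hres (by simp)
      · rw [if_neg hut] at hres
        obtain ⟨new, h1, h2, h3, h4⟩ := pvStepB_spec w (adj.getD u []) (rest, seen)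
        simp only [h1] at hres
        have huseen : u ∈ seen := hq u List.mem_cons_self
        have hnd' : (seen ++ new).Nodup := h4 hnd
        have hdisj : ∀ x ∈ new, x ∉ seen := fun x hx => (h2 x hx).2
        have hconc := ih (rest ++ new) (seen ++ new)
          (by intro x hx
              rcases List.mem_append.1 hx with hx | hx
              · exact List.mem_append.2 (Or.inl (hq x (List.mem_cons_of_mem _ hx)))
              · exact List.mem_append.2 (Or.inr hx))
          (by rw [List.nodup_append]
              refine ⟨(List.nodup_cons.1 hqnd).2, (List.nodup_append.1 hnd').2.1, ?_⟩
              exact fun a ha b hb hab => hdisj b hb (hab ▸ hq a (List.mem_cons_of_mem _ ha)))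
          hnd'
          (by intro x hx
              rcases List.mem_append.1 hx with hx | hx
              · exact hsU x hx
              · obtain ⟨⟨p, hp, hxe, _⟩, _⟩ := h2 x hx
                exact hxe ▸ Hadj1 u p.1 p.2 hp)
          (by intro x hx hnx
              rcases List.mem_append.1 hx with hx | hx
              · by_cases hxu : x = u
                · subst hxu
                  refine ⟨hut, ?_⟩
                  intro y hadj
                  obtain ⟨cap, hmem, hwc⟩ := Hadj2 x y hadj
                  exact h3 (y, cap) hmem hwc
                · have : x ∉ rest := fun h => hnx (List.mem_append.2 (Or.inl h))
                  obtain ⟨hxt, hcl⟩ := hclosed x hx (by simp [hxu, this])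
                  exact ⟨hxt, fun y hy => List.mem_append.2 (Or.inl (hcl y hy))⟩
              · exact absurd (List.mem_append.2 (Or.inr hx)) hnx)
          (by simp at hfuel ⊢; omega)
          hres
        intro x hx z hz
        exact hconc x (List.mem_append.2 (Or.inl hx)) z hz

def pvPairsA (E : List (Int × Int × Int)) : List (Int × (Int × Int)) :=
  E.flatMap (fun e => [(e.1, (e.2.1, e.2.2)), (e.2.1, (e.1, e.2.2))])

theorem pvD0_getD (l : List Int) :
    ∀ d : PySem.Dict Int (List (Int × Int)), ∀ c : Int, d.getD c [] = [] →
      (l.foldl (fun d k => d.insert k ([] : List (Int × Int))) d).getD c [] = [] := by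
  induction l with
  | nil => intro d c h; simpa using h
  | cons k l ih =>
    intro d c h
    simp only [List.foldl_cons]
    apply ih
    rw [PySem.Dict.getD_insert]
    split_ifs <;> simp [h]

theorem pvFold_pairs (E : List (Int × Int × Int)) :
    ∀ d : PySem.Dict Int (List (Int × Int)),
      E.foldl (fun d e =>
        (d.modify e.1 [] (fun l => l ++ [(e.2.1, e.2.2)])).modify e.2.1 [] (fun l => l ++ [(e.1, e.2.2)])) d
      = (pvPairsA E).foldl (fun d p => d.modify p.1 [] (fun l => l ++ [p.2])) d := by
  induction E with
  | nil => intro d; simp [pvPairsA]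
  | cons e E ih =>
    intro d
    simp only [List.foldl_cons, pvPairsA, List.flatMap_cons, List.foldl_append] at *
    rw [ih]
    rfl

theorem pvAdjA_getD (n : Int) (E : List (Int × Int × Int)) (c : Int) :
    (pvAdjA n E).getD c [] = ((pvPairsA E).filter (fun p => p.1 == c)).map (·.2) := by
  unfold pvAdjA
  rw [pvFold_pairs, PySem.Dict.getD_foldl_modify_append]
  rw [pvD0_getD _ _ _ (by simp [PySem.Dict.getD_empty])]
  simp

theorem pvAdjA_mem (n : Int) (E : List (Int × Int × Int)) (c y cap : Int) :
    (y, cap) ∈ (pvAdjA n E).getD c [] ↔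
      ∃ e ∈ E, cap = e.2.2 ∧ ((c = e.1 ∧ y = e.2.1) ∨ (c = e.2.1 ∧ y = e.1)) := by
  rw [pvAdjA_getD]
  simp only [List.mem_map, List.mem_filter, pvPairsA, List.mem_flatMap, List.mem_cons,
    beq_iff_eq]
  constructor
  · rintro ⟨p, ⟨⟨e, he, hp⟩, hpc⟩, hpy⟩
    rcases hp with hp | hp | hp
    · subst hp
      injection hpy with h1 h2
      exact ⟨e, he, h2.symm, Or.inl ⟨hpc.symm, h1.symm⟩⟩
    · subst hp
      injection hpy with h1 h2
      exact ⟨e, he, h2.symm, Or.inr ⟨hpc.symm, h1.symm⟩⟩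
    · exact absurd hp (by simp)
  · rintro ⟨e, he, hcap, hcase | hcase⟩
    · exact ⟨(e.1, (e.2.1, e.2.2)), ⟨⟨e, he, by simp⟩, by simp [hcase.1]⟩, by simp [hcase.2, hcap]⟩
    · exact ⟨(e.2.1, (e.1, e.2.2)), ⟨⟨e, he, by simp⟩, by simp [hcase.1]⟩, by simp [hcase.2, hcap]⟩

theorem pvDfsA_sound (E : List (Int × Int × Int)) (adj : PySem.Dict Int (List (Int × Int)))
    (t w : Int)
    (Hadj : ∀ c y cap, (y, cap) ∈ adj.getD c [] → w ≤ cap → pvAdjRel E w c y) :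
    ∀ fuel : Nat,
      (∀ c V, (pvDfsA adj t w fuel c V).1 = true → pvConn E w c t) ∧
      (∀ (l : List (Int × Int)) c V, (∀ p ∈ l, p ∈ adj.getD c []) →
        (pvVisitA adj t w fuel l V).1 = true → pvConn E w c t) := by
  have visitStep : ∀ fuel,
      (∀ c V, (pvDfsA adj t w fuel c V).1 = true → pvConn E w c t) →
      (∀ (l : List (Int × Int)) c V, (∀ p ∈ l, p ∈ adj.getD c []) →
        (pvVisitA adj t w fuel l V).1 = true → pvConn E w c t) := by
    intro fuel h1 l
    induction l with
    | nil => intro c V _ h; rw [pvVisitA] at h; simp at h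
    | cons p rest ih =>
      obtain ⟨nxt, cap⟩ := p
      intro c V hmem h
      rw [pvVisitA] at h
      split_ifs at h with hcond
      · rcases hdfs : pvDfsA adj t w fuel nxt V with ⟨b, V'⟩
        rw [hdfs] at h
        cases b with
        | true =>
          have hconn := h1 nxt V (by rw [hdfs])
          have hadj := Hadj c nxt cap (hmem (nxt, cap) List.mem_cons_self) hcond.2
          exact Relation.ReflTransGen.head hadj hconn
        | false =>
          exact ih c V' (fun p hp => hmem p (List.mem_cons_of_mem _ hp)) h
      · exact ih c V (fun p hp => hmem p (List.mem_cons_of_mem _ hp)) h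
  intro fuel
  induction fuel with
  | zero =>
    have h1 : ∀ c V, (pvDfsA adj t w 0 c V).1 = true → pvConn E w c t := by
      intro c V h
      rw [pvDfsA] at h
      split_ifs at h with hct
      · exact hct ▸ Relation.ReflTransGen.refl
    exact ⟨h1, visitStep 0 h1⟩
  | succ fuel ih =>
    have h1 : ∀ c V, (pvDfsA adj t w (fuel + 1) c V).1 = true → pvConn E w c t := by
      intro c V h
      rw [pvDfsA] at h
      split_ifs at h with hct
      · exact hct ▸ Relation.ReflTransGen.refl
      · exact visitStep fuel ih.1 _ c _ (fun p hp => hp) h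
    exact ⟨h1, visitStep (fuel + 1) h1⟩

theorem pvDfsA_complete (E : List (Int × Int × Int)) (adj : PySem.Dict Int (List (Int × Int)))
    (t w : Int) (U : List Int)
    (Hadj1 : ∀ c y cap, (y, cap) ∈ adj.getD c [] → y ∈ U)
    (Hadj2 : ∀ c y, pvAdjRel E w c y → ∃ cap, (y, cap) ∈ adj.getD c [] ∧ w ≤ cap) :
    ∀ fuel : Nat,
      (∀ c V, c ∈ U → c ∉ V → V.Nodup → (∀ x ∈ V, x ∈ U) → U.length ≤ fuel + V.length →
        ∀ V', pvDfsA adj t w fuel c V = (false, V') →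
          (∀ x ∈ V, x ∈ V') ∧ c ∈ V' ∧ V'.Nodup ∧ (∀ x ∈ V', x ∈ U) ∧ (t ∈ V' → t ∈ V) ∧
          (∀ x ∈ V', x ∉ V → ∀ y, pvAdjRel E w x y → y ∈ V')) ∧
      (∀ (l : List (Int × Int)) c V, (∀ p ∈ l, p ∈ adj.getD c []) → V.Nodup →
        (∀ x ∈ V, x ∈ U) → U.length ≤ fuel + V.length →
        ∀ V', pvVisitA adj t w fuel l V = (false, V') →
          (∀ x ∈ V, x ∈ V') ∧ V'.Nodup ∧ (∀ x ∈ V', x ∈ U) ∧ (t ∈ V' → t ∈ V) ∧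
          (∀ x ∈ V', x ∉ V → ∀ y, pvAdjRel E w x y → y ∈ V') ∧
          (∀ p ∈ l, w ≤ p.2 → p.1 ∈ V')) := by
  have visitStep : ∀ fuel,
      (∀ c V, c ∈ U → c ∉ V → V.Nodup → (∀ x ∈ V, x ∈ U) → U.length ≤ fuel + V.length →
        ∀ V', pvDfsA adj t w fuel c V = (false, V') →
          (∀ x ∈ V, x ∈ V') ∧ c ∈ V' ∧ V'.Nodup ∧ (∀ x ∈ V', x ∈ U) ∧ (t ∈ V' → t ∈ V) ∧
          (∀ x ∈ V', x ∉ V → ∀ y, pvAdjRel E w x y → y ∈ V')) →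
      (∀ (l : List (Int × Int)) c V, (∀ p ∈ l, p ∈ adj.getD c []) → V.Nodup →
        (∀ x ∈ V, x ∈ U) → U.length ≤ fuel + V.length →
        ∀ V', pvVisitA adj t w fuel l V = (false, V') →
          (∀ x ∈ V, x ∈ V') ∧ V'.Nodup ∧ (∀ x ∈ V', x ∈ U) ∧ (t ∈ V' → t ∈ V) ∧
          (∀ x ∈ V', x ∉ V → ∀ y, pvAdjRel E w x y → y ∈ V') ∧
          (∀ p ∈ l, w ≤ p.2 → p.1 ∈ V')) := by
    intro fuel h1 l
    induction l with
    | nil =>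
      intro c V _ hnd hsub _ V' heq
      rw [pvVisitA] at heq
      injection heq with _ hV
      subst hV
      exact ⟨fun x hx => hx, hnd, hsub, fun h => h, fun x hx hnx => absurd hx hnx, by simp⟩
    | cons p rest ih =>
      obtain ⟨nxt, cap⟩ := p
      intro c V hmem hnd hsub hlen V' heq
      rw [pvVisitA] at heq
      split_ifs at heq with hcond
      · rcases hdfs : pvDfsA adj t w fuel nxt V with ⟨b, V₁⟩
        rw [hdfs] at heq
        cases b with
        | true => exact absurd heq (by simp)
        | false =>
          have hnxtU : nxt ∈ U := Hadj1 c nxt cap (hmem (nxt, cap) List.mem_cons_self)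
          obtain ⟨hVV₁, hnxtV₁, hnd₁, hsub₁, htV₁, hclo₁⟩ :=
            h1 nxt V hnxtU (pv_not_mem hcond.1) hnd hsub hlen V₁ hdfs
          have hVlen : V.length ≤ V₁.length :=
            (List.subperm_of_subset hnd (fun x hx => hVV₁ x hx)).length_le
          obtain ⟨hV₁V', hnd', hsub', htV', hclo', hrest⟩ :=
            ih c V₁ (fun p hp => hmem p (List.mem_cons_of_mem _ hp)) hnd₁ hsub₁
              (by omega) V' heq
          refine ⟨fun x hx => hV₁V' x (hVV₁ x hx), hnd', hsub',
            fun h => htV₁ (htV' h), ?_, ?_⟩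
          · intro x hx hnx y hadj
            by_cases hx₁ : x ∈ V₁
            · exact hV₁V' y (hclo₁ x hx₁ hnx y hadj)
            · exact hclo' x hx hx₁ y hadj
          · intro p hp hwp
            rcases List.mem_cons.1 hp with h | h
            · subst h; exact hV₁V' nxt hnxtV₁
            · exact hrest p h hwp
      · obtain ⟨hVV', hnd', hsub', htV', hclo', hrest⟩ :=
          ih c V (fun p hp => hmem p (List.mem_cons_of_mem _ hp)) hnd hsub hlen V' heq
        refine ⟨hVV', hnd', hsub', htV', hclo', ?_⟩
        intro p hp hwp
        rcases List.mem_cons.1 hp with h | h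
        · subst h
          have : PySem.Set.contains V nxt = true := by
            cases hc : PySem.Set.contains V nxt
            · exact absurd ⟨hc, hwp⟩ hcond
            · rfl
          exact hVV' nxt (pv_mem this)
        · exact hrest p h hwp
  have dfsLow : ∀ (c : Int) (V : PySem.Set Int), c ∈ U → c ∉ V → V.Nodup → (∀ x ∈ V, x ∈ U) →
      V.length + 1 ≤ U.length := by
    intro c V hc hcV hnd hsub
    have : (c :: V).Nodup := List.nodup_cons.2 ⟨hcV, hnd⟩
    have hsub' : (c :: V) ⊆ U := by
      intro x hx
      rcases List.mem_cons.1 hx with h | h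
      · exact h ▸ hc
      · exact hsub x h
    simpa using (List.subperm_of_subset this hsub').length_le
  intro fuel
  induction fuel with
  | zero =>
    have h1 : ∀ c V, c ∈ U → c ∉ V → V.Nodup → (∀ x ∈ V, x ∈ U) → U.length ≤ 0 + V.length →
        ∀ V', pvDfsA adj t w 0 c V = (false, V') →
          (∀ x ∈ V, x ∈ V') ∧ c ∈ V' ∧ V'.Nodup ∧ (∀ x ∈ V', x ∈ U) ∧ (t ∈ V' → t ∈ V) ∧
          (∀ x ∈ V', x ∉ V → ∀ y, pvAdjRel E w x y → y ∈ V') := by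
      intro c V hc hcV hnd hsub hlen V' _
      have := dfsLow c V hc hcV hnd hsub
      omega
    exact ⟨h1, visitStep 0 h1⟩
  | succ fuel ih =>
    have h1 : ∀ c V, c ∈ U → c ∉ V → V.Nodup → (∀ x ∈ V, x ∈ U) →
        U.length ≤ (fuel + 1) + V.length →
        ∀ V', pvDfsA adj t w (fuel + 1) c V = (false, V') →
          (∀ x ∈ V, x ∈ V') ∧ c ∈ V' ∧ V'.Nodup ∧ (∀ x ∈ V', x ∈ U) ∧ (t ∈ V' → t ∈ V) ∧
          (∀ x ∈ V', x ∉ V → ∀ y, pvAdjRel E w x y → y ∈ V') := by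
      intro c V hc hcV hnd hsub hlen V' heq
      rw [pvDfsA] at heq
      split_ifs at heq with hct
      · exact absurd heq (by simp)
      have hadd : PySem.Set.add V c = V ++ [c] := PySem.Set.add_of_not_mem hcV
      rw [hadd] at heq
      obtain ⟨hVV', hnd', hsub', htV', hclo', hl'⟩ :=
        ih.2 (adj.getD c []) c (V ++ [c]) (fun p hp => hp)
          (by simp [List.nodup_append, hnd]; exact fun a ha hac => hcV (hac ▸ ha))
          (by intro x hx
              rcases List.mem_append.1 hx with h | h
              · exact hsub x h
              · simp at h; exact h ▸ hc)
          (by simp; omega) V' heq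
      have hcV' : c ∈ V' := hVV' c (List.mem_append.2 (Or.inr (by simp)))
      refine ⟨fun x hx => hVV' x (List.mem_append.2 (Or.inl hx)), hcV', hnd', hsub', ?_, ?_⟩
      · intro ht
        rcases List.mem_append.1 (htV' ht) with h | h
        · exact h
        · simp at h; exact absurd h.symm hct
      · intro x hx hnx y hadj
        by_cases hx₁ : x ∈ V ++ [c]
        · rcases List.mem_append.1 hx₁ with h | h
          · exact absurd h hnx
          · simp at h
            subst h
            obtain ⟨cap, hmem, hwc⟩ := Hadj2 x y hadj
            exact hl' (y, cap) hmem hwc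
        · exact hclo' x hx hx₁ y hadj
    exact ⟨h1, visitStep (fuel + 1) h1⟩

theorem pvBfsB_head (adj : PySem.Dict Int (List (Int × Int))) (t w : Int) (fuel : Nat)
    (queue : List Int) (seen : PySem.Set Int) :
    pvBfsB adj t w (fuel + 1) (t :: queue) seen = true := by
  simp [pvBfsB]

theorem pvAdjB_eq (n : Int) (E : List (Int × Int × Int)) : pvAdjB n E = pvAdjA n E := rfl

theorem pvQuery_eq (n : Int) (E : List (Int × Int × Int))
    (hE : ∀ e ∈ E, 0 ≤ e.1 ∧ e.1 < n ∧ 0 ≤ e.2.1 ∧ e.2.1 < n)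
    (s t w : Int) (hq : s = t ∨ (0 ≤ s ∧ s < n)) :
    (pvDfsA (pvAdjA n E) t w (n.toNat + 1) s PySem.Set.empty).1
      = pvBfsB (pvAdjB n E) t w (n.toNat + 2) [s] (PySem.Set.add PySem.Set.empty s) := by
  rw [pvAdjB_eq]
  have hseed : PySem.Set.add PySem.Set.empty s = [s] := rfl
  rw [hseed]
  by_cases hst : s = t
  · subst hst
    have hL : (pvDfsA (pvAdjA n E) s w (n.toNat + 1) s PySem.Set.empty).1 = true := by
      rw [pvDfsA]; simp
    rw [hL, pvBfsB_head (pvAdjA n E) s w (n.toNat + 1) [] [s]]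
  · obtain ⟨hs0, hsn⟩ := hq.resolve_left hst
    have Hadj1 : ∀ c y cap, (y, cap) ∈ (pvAdjA n E).getD c [] → y ∈ PySem.List.pyRange 0 n 1 := by
      intro c y cap hm
      obtain ⟨e, he, _, hcase⟩ := (pvAdjA_mem n E c y cap).1 hm
      obtain ⟨h1, h2, h3, h4⟩ := hE e he
      rcases hcase with ⟨_, hy⟩ | ⟨_, hy⟩ <;> subst hy <;>
        exact (PySem.List.mem_pyRange_one).2 ⟨by omega, by omega⟩
    have Hadj2 : ∀ c y, pvAdjRel E w c y →
        ∃ cap, (y, cap) ∈ (pvAdjA n E).getD c [] ∧ w ≤ cap := by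
      intro c y ⟨e, he, hwe, hcase⟩
      exact ⟨e.2.2, (pvAdjA_mem n E c y e.2.2).2 ⟨e, he, rfl, hcase⟩, hwe⟩
    have Hadj : ∀ c y cap, (y, cap) ∈ (pvAdjA n E).getD c [] → w ≤ cap → pvAdjRel E w c y := by
      intro c y cap hm hwc
      obtain ⟨e, he, hcap, hcase⟩ := (pvAdjA_mem n E c y cap).1 hm
      exact ⟨e, he, hcap ▸ hwc, hcase⟩
    have hUlen : (PySem.List.pyRange 0 n 1).length = n.toNat := by
      rw [PySem.List.length_pyRange_one]; simp
    have hsU : s ∈ PySem.List.pyRange 0 n 1 := (PySem.List.mem_pyRange_one).2 ⟨hs0, hsn⟩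
    have hBcomplete : pvBfsB (pvAdjA n E) t w (n.toNat + 2) [s] [s] = false →
        ¬ pvConn E w s t := by
      intro hB hconn
      have := pvBfsB_complete E (pvAdjA n E) t w (PySem.List.pyRange 0 n 1) Hadj1 Hadj2
        (n.toNat + 2) [s] [s] (fun x hx => hx) (by simp) (by simp)
        (by intro x hx; simp at hx; exact hx ▸ hsU)
        (fun x hx hnx => absurd hx hnx)
        (by simp [hUlen]) hB s (by simp) t hconn
      exact this rfl
    have hBsound : pvBfsB (pvAdjA n E) t w (n.toNat + 2) [s] [s] = true →
        pvConn E w s t := by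
      intro hB
      exact pvBfsB_sound E (pvAdjA n E) s t w Hadj (n.toNat + 2) [s] [s]
        (by intro x hx; simp at hx; exact hx ▸ Relation.ReflTransGen.refl)
        (fun x hx => hx) hB
    cases hA : (pvDfsA (pvAdjA n E) t w (n.toNat + 1) s PySem.Set.empty).1 with
    | false =>
      have heq : pvDfsA (pvAdjA n E) t w (n.toNat + 1) s PySem.Set.empty
          = (false, (pvDfsA (pvAdjA n E) t w (n.toNat + 1) s PySem.Set.empty).2) := by
        rw [← hA]
      obtain ⟨_, hsV', _, _, htV', hclo⟩ :=
        (pvDfsA_complete E (pvAdjA n E) t w (PySem.List.pyRange 0 n 1) Hadj1 Hadj2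
          (n.toNat + 1)).1 s PySem.Set.empty hsU (by simp [PySem.Set.empty])
          (by simp [PySem.Set.empty]) (by simp [PySem.Set.empty])
          (by simp [PySem.Set.empty, hUlen]) _ heq
      have hnc : ¬ pvConn E w s t := by
        intro hconn
        have hmem : ∀ z, pvConn E w s z →
            z ∈ (pvDfsA (pvAdjA n E) t w (n.toNat + 1) s PySem.Set.empty).2 := by
          intro z hz
          induction hz with
          | refl => exact hsV'
          | tail hab hbc ihb => exact hclo _ ihb (by simp [PySem.Set.empty]) _ hbc
        simpa [PySem.Set.empty] using htV' (hmem t hconn)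
      cases hB : pvBfsB (pvAdjA n E) t w (n.toNat + 2) [s] [s] with
      | false => rfl
      | true => exact absurd (hBsound hB) hnc
    | true =>
      have hconn := (pvDfsA_sound E (pvAdjA n E) t w Hadj (n.toNat + 1)).1 s PySem.Set.empty hA
      cases hB : pvBfsB (pvAdjA n E) t w (n.toNat + 2) [s] [s] with
      | false => exact absurd hconn (hBcomplete hB)
      | true => rfl

-- ===== VERDICT (by name: the statement is the Claim_ definition above) =====
theorem WeightLimitedPathsExist_spec : Claim_equal_WeightLimitedPathsExist := by
  intro n E Q _ hpre
  show WeightLimitedPathsExist n E Q = WeightLimitedPathsExist_alt n E Q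
  simp only [WeightLimitedPathsExist, WeightLimitedPathsExist_alt]
  rw [PySem.List.foldl_append_singleton_eq_map, PySem.List.foldl_append_singleton_eq_map]
  simp only [List.nil_append]
  exact List.map_congr_left fun q hq => pvQuery_eq n E hpre.1 q.1 q.2.1 q.2.2 (hpre.2 q hq)
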